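-- pv_equiv track=rewrite | github.com/SeraphWedd/CodeChef_Codes-Python-3.x- | beginner/COOMILK.py | coomilk
-- ===== SOURCE A (Python) =====
-- def coomilk(n, arr):
--     if arr[-1] == 'cookie':
--         return 'NO'
--     for x in range(n-1):
--         if arr[x] == 'cookie':
--             if arr[x+1] == 'cookie':
--                 return 'NO'
--     return 'YES'
-- ===== SOURCE B (Python) =====
-- def coomilk(n, arr):
--     if arr[-1] == 'cookie':
--         return 'NO'
--     # run-length encode the first n elements, then look for a
--     # 'cookie' run of length >= 2
--     runs = []
--     for s in arr[:max(n, 0)]: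
--         if runs and runs[-1][0] == s:
--             runs[-1] = (s, runs[-1][1] + 1)
--         else:
--             runs.append((s, 1))
--     return 'NO' if any(s == 'cookie' and c >= 2 for s, c in runs) else 'YES'
-- ===== Notes on version B (the rewrite author's own statement) =====
-- stated objective: alternative
-- what changed: A scans index pairs (arr[x], arr[x+1]) over range(n-1); B run-length-encodes the first n elements and reports 'NO' iff some 'cookie' run has length >= 2 (after the same trailing-cookie guard).
import Mathlib
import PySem

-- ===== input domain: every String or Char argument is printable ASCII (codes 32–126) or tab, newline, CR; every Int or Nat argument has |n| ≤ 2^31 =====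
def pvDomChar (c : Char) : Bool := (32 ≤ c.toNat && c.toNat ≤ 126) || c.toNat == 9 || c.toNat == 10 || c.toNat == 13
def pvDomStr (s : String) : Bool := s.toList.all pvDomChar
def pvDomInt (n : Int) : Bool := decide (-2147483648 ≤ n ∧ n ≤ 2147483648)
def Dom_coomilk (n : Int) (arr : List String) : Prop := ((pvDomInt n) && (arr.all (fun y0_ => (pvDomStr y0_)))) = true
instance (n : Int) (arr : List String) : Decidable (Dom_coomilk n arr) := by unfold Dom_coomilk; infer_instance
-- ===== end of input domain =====

-- B replaces A's adjacent-index-pair scan by a run-length encoding of the first n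
-- elements followed by a 'cookie'-run-length test; same cost, different algorithm.

-- ===== PORT A =====
-- the 'for x in range(n-1)' loop with its two early-return tests
def coomilkLoop (arr : List String) (x stop : Int) : String :=
  if _h : x < stop then
    if (PySem.List.pyGet? arr x).getD "" = "cookie" then
      if (PySem.List.pyGet? arr (x + 1)).getD "" = "cookie" then "NO"
      else coomilkLoop arr (x + 1) stop
    else coomilkLoop arr (x + 1) stop
  else "YES"
termination_by (stop - x).toNat
decreasing_by all_goals omega

def coomilk (n : Int) (arr : List String) : String :=
  if PySem.List.pyGet? arr (-1) = some "cookie" then "NO"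
  else coomilkLoop arr 0 (n - 1)

-- ===== PORT B =====
-- one step of the run-length encoder: extend the last run or append a new one
def runStep (runs : List (String × Int)) (s : String) : List (String × Int) :=
  match runs.getLast? with
  | none => [(s, 1)]
  | some (k, c) => if k = s then runs.dropLast ++ [(s, c + 1)] else runs ++ [(s, 1)]

def coomilk_alt (n : Int) (arr : List String) : String :=
  if PySem.List.pyGet? arr (-1) = some "cookie" then "NO"
  else if ((PySem.List.slice arr none (some (max n 0))).foldl runStep []).any
      (fun p => p.1 == "cookie" && decide (2 ≤ p.2)) then "NO" else "YES"

-- ===== PRECONDITION & SPEC =====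
-- Pre_ is exactly where A returns: it excludes only the inputs where A raises
-- IndexError (empty arr, or the scan running past the end: last element not 'cookie',
-- n > len(arr)+1 and no adjacent 'cookie' pair to stop at early).
def Pre_coomilk (n : Int) (arr : List String) : Prop :=
  arr ≠ [] ∧ (arr.getLast? = some "cookie" ∨ n ≤ (arr.length : Int) + 1 ∨
    ("cookie", "cookie") ∈ arr.zip arr.tail)
instance (n : Int) (arr : List String) : Decidable (Pre_coomilk n arr) := by
  unfold Pre_coomilk; infer_instance

def pvWitness_coomilk : Int × List String := (3, ["milk", "cookie", "milk"])

def Spec_coomilk (n : Int) (arr : List String) (out : String) : Prop := out = coomilk_alt n arr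
instance (n : Int) (arr : List String) (out : String) : Decidable (Spec_coomilk n arr out) := by
  unfold Spec_coomilk; infer_instance

-- ===== CLAIM (what is proved, stated in full; the proofs are below) =====
def Claim_equal_coomilk : Prop :=
  ∀ (n : Int) (arr : List String), Dom_coomilk n arr → Pre_coomilk n arr →
    Spec_coomilk n arr (coomilk n arr)

-- ===== LEMMAS AND PROOFS =====

-- adjacent 'cookie'-pair test on a list (the common spec both ports are reduced to)
def hasPair : List String → Bool
  | a :: b :: r => (a == "cookie" && b == "cookie") || hasPair (b :: r)
  | _ => false

-- pair test threading the previous element (matches B's run-length fold)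
def hasPairP : Option String → List String → Bool
  | _, [] => false
  | prev, s :: rest => (prev == some "cookie" && s == "cookie") || hasPairP (some s) rest

lemma hasPair_short (l : List String) (h : l.length ≤ 1) : hasPair l = false := by
  match l with
  | [] => rfl
  | [_] => rfl
  | _ :: _ :: _ => simp at h

lemma hasPairP_eq (l : List String) : ∀ prev,
    hasPairP prev l =
      ((match l with
        | [] => false
        | s :: _ => prev == some "cookie" && s == "cookie") || hasPair l) := by
  induction l with
  | nil => intro prev; simp [hasPairP, hasPair]
  | cons s rest ih =>
    intro prev
    rw [hasPairP, ih (some s)]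
    cases rest with
    | nil =>
      cases prev <;> simp [hasPair]
    | cons b r => simp [hasPair]

-- A's loop computes the adjacent-pair test on arr[:stop+1] (for stop ≤ len(arr))
lemma loopA_eq (arr : List String) (stop : Int) (hstop : stop ≤ (arr.length : Int)) :
    ∀ (k : Nat) (x : Int), (stop - x).toNat = k → 0 ≤ x →
      coomilkLoop arr x stop =
        if hasPair (List.drop x.toNat (List.take (stop + 1).toNat arr)) then "NO" else "YES" := by
  intro k
  induction k with
  | zero =>
    intro x hk hx
    have hxs : ¬ x < stop := by omega
    rw [coomilkLoop, dif_neg hxs]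
    have hlen : (List.drop x.toNat (List.take (stop + 1).toNat arr)).length ≤ 1 := by
      rw [List.length_drop, List.length_take]
      omega
    rw [hasPair_short _ hlen]
    simp
  | succ k ih =>
    intro x hk hx
    have hxs : x < stop := by omega
    have hx1 : x < (arr.length : Int) := by omega
    have hxn : x.toNat < arr.length := by omega
    have hxt : x.toNat < (stop + 1).toNat := by omega
    have g1 : PySem.List.pyGet? arr x = some arr[x.toNat] :=
      PySem.List.pyGet?_eq_some_getElem arr hx (by exact_mod_cast hx1)
    have hjt : x.toNat < (List.take (stop + 1).toNat arr).length := by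
      simp only [List.length_take]; omega
    have d1 : List.drop x.toNat (List.take (stop + 1).toNat arr) =
        arr[x.toNat] :: List.drop (x.toNat + 1) (List.take (stop + 1).toNat arr) := by
      rw [List.drop_eq_getElem_cons hjt, List.getElem_take]
    by_cases hb : x + 1 < (arr.length : Int)
    case neg =>
      -- boundary: x+1 = len(arr) (so stop = len(arr)); arr[x+1] is the getD default
      have hxe : x + 1 = (arr.length : Int) := by omega
      have hse : stop = (arr.length : Int) := by omega
      have g2 : PySem.List.pyGet? arr (x + 1) = none := by
        rw [PySem.List.pyGet?_eq_none_iff]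
        unfold PySem.Raise.InRange
        omega
      have d2 : List.drop (x.toNat + 1) (List.take (stop + 1).toNat arr) = [] := by
        rw [List.drop_eq_nil_iff]
        rw [List.length_take]
        omega
      have hrec : coomilkLoop arr (x + 1) stop = "YES" := by
        rw [coomilkLoop, dif_neg (by omega)]
      rw [coomilkLoop, dif_pos hxs, g1, g2]
      simp only [Option.getD_some, Option.getD_none]
      rw [d1, d2]
      by_cases hA : arr[x.toNat] = "cookie" <;> simp [hA, hrec, hasPair]
    case pos =>
    have hx2 : x + 1 < (arr.length : Int) := hb
    have hxn2 : x.toNat + 1 < arr.length := by omega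
    have hxt2 : x.toNat + 1 < (stop + 1).toNat := by omega
    have g2 : PySem.List.pyGet? arr (x + 1) = some arr[x.toNat + 1] := by
      have e : (x + 1).toNat = x.toNat + 1 := by omega
      rw [PySem.List.pyGet?_eq_some_getElem arr (by omega) (by exact_mod_cast hx2)]
      simp [e]
    have hjt2 : x.toNat + 1 < (List.take (stop + 1).toNat arr).length := by
      simp only [List.length_take]; omega
    have d2 : List.drop (x.toNat + 1) (List.take (stop + 1).toNat arr) =
        arr[x.toNat + 1] :: List.drop (x.toNat + 2) (List.take (stop + 1).toNat arr) := by
      rw [List.drop_eq_getElem_cons hjt2, List.getElem_take]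
    have hrec : coomilkLoop arr (x + 1) stop =
        if hasPair (List.drop (x.toNat + 1) (List.take (stop + 1).toNat arr)) then "NO"
        else "YES" := by
      have := ih (x + 1) (by omega) (by omega)
      rwa [show (x + 1).toNat = x.toNat + 1 by omega] at this
    rw [coomilkLoop, dif_pos hxs, g1, g2]
    simp only [Option.getD_some]
    rw [d1, d2, hasPair]
    by_cases hA : arr[x.toNat] = "cookie"
    · by_cases hB : arr[x.toNat + 1] = "cookie"
      · simp [hA, hB]
      · simp only [hA, hB, if_pos, hrec, d2]
        simp [hB]
    · simp only [if_neg hA, hrec, d2]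
      simp [hA]

-- with stop ≥ len(arr), A's loop finds any adjacent pair of arr before running out
lemma loopA_NO (arr : List String) (stop : Int) (hstop : (arr.length : Int) ≤ stop) :
    ∀ (k : Nat) (x : Int), ((arr.length : Int) - x).toNat = k → 0 ≤ x →
      hasPair (List.drop x.toNat arr) = true → coomilkLoop arr x stop = "NO" := by
  intro k
  induction k with
  | zero =>
    intro x hk hx hp
    exfalso
    have : (List.drop x.toNat arr).length ≤ 1 := by rw [List.length_drop]; omega
    rw [hasPair_short _ this] at hp
    exact Bool.false_ne_true hp
  | succ k ih =>
    intro x hk hx hp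
    have hlen2 : 2 ≤ (List.drop x.toNat arr).length := by
      by_contra h
      rw [hasPair_short _ (by omega)] at hp
      exact Bool.false_ne_true hp
    rw [List.length_drop] at hlen2
    have hxn : x.toNat < arr.length := by omega
    have hxn2 : x.toNat + 1 < arr.length := by omega
    have g1 : PySem.List.pyGet? arr x = some arr[x.toNat] :=
      PySem.List.pyGet?_eq_some_getElem arr hx (by exact_mod_cast (by omega : x < (arr.length : Int)))
    have g2 : PySem.List.pyGet? arr (x + 1) = some arr[x.toNat + 1] := by
      have e : (x + 1).toNat = x.toNat + 1 := by omega
      rw [PySem.List.pyGet?_eq_some_getElem arr (by omega) (by exact_mod_cast (by omega : x + 1 < (arr.length : Int)))]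
      simp [e]
    have d1 : List.drop x.toNat arr = arr[x.toNat] :: List.drop (x.toNat + 1) arr :=
      List.drop_eq_getElem_cons hxn
    have d2 : List.drop (x.toNat + 1) arr = arr[x.toNat + 1] :: List.drop (x.toNat + 2) arr :=
      List.drop_eq_getElem_cons hxn2
    rw [d1, d2, hasPair] at hp
    have hrec : hasPair (List.drop (x + 1).toNat arr) = true →
        coomilkLoop arr (x + 1) stop = "NO" := ih (x + 1) (by omega) (by omega)
    rw [show (x + 1).toNat = x.toNat + 1 by omega, d2] at hrec
    rw [coomilkLoop, dif_pos (by omega : x < stop), g1, g2]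
    simp only [Option.getD_some]
    by_cases hA : arr[x.toNat] = "cookie"
    · by_cases hB : arr[x.toNat + 1] = "cookie"
      · simp [hA, hB]
      · simp only [hA, if_pos, if_neg hB]
        apply hrec
        simpa [hA, hB] using hp
    · rw [if_neg hA]
      apply hrec
      simpa [hA] using hp

-- the Pre_ pair condition is the hasPair test
lemma hasPair_iff_zip (arr : List String) :
    ("cookie", "cookie") ∈ arr.zip arr.tail ↔ hasPair arr = true := by
  match arr with
  | [] => simp [hasPair]
  | [a] => simp [hasPair]
  | a :: b :: r =>
    have ih := hasPair_iff_zip (b :: r)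
    rw [show (a :: b :: r).tail = b :: r from rfl, List.zip_cons_cons, List.mem_cons, hasPair]
    simp only [Bool.or_eq_true, Bool.and_eq_true, beq_iff_eq, ← ih, Prod.ext_iff]
    tauto

-- the run-length encoder with the state reversed (most recent run first; proof device)
def runStepR (runs : List (String × Int)) (s : String) : List (String × Int) :=
  match runs with
  | [] => [(s, 1)]
  | (k, c) :: t => if k = s then (s, c + 1) :: t else (s, 1) :: (k, c) :: t

lemma runStep_eq_reverse (runs : List (String × Int)) (s : String) :
    runStep runs s = (runStepR runs.reverse s).reverse := by
  rcases List.eq_nil_or_concat runs with rfl | ⟨t, a, rfl⟩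
  · rfl
  · obtain ⟨k, c⟩ := a
    simp only [runStep, runStepR]
    by_cases hk : k = s <;> simp [hk]

lemma foldl_runStep_eq_reverse (l : List String) : ∀ (runs : List (String × Int)),
    List.foldl runStep runs l = (List.foldl runStepR runs.reverse l).reverse := by
  induction l with
  | nil => intro runs; simp
  | cons s rest ih =>
    intro runs
    rw [List.foldl_cons, List.foldl_cons, ih, runStep_eq_reverse, List.reverse_reverse]

-- B's run-length fold (in reversed-state form) computes the threaded pair test
lemma foldB_eq (l : List String) : ∀ (runs : List (String × Int)),
    (∀ p ∈ runs, 1 ≤ p.2) →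
      ((List.foldl runStepR runs l).any (fun p => p.1 == "cookie" && decide (2 ≤ p.2))) =
        (runs.any (fun p => p.1 == "cookie" && decide (2 ≤ p.2)) ||
          hasPairP (runs.head?.map Prod.fst) l) := by
  induction l with
  | nil => intro runs _; simp [hasPairP]
  | cons s rest ih =>
    intro runs hruns
    rw [List.foldl_cons]
    match runs, hruns with
    | [], _ =>
      rw [show runStepR [] s = [(s, 1)] from rfl,
        ih [(s, 1)] (by intro p hp; simp at hp; simp [hp])]
      simp [hasPairP]
    | (k, c) :: t, hruns =>
      by_cases hk : k = s
      · rw [show runStepR ((k, c) :: t) s = (s, c + 1) :: t by simp [runStepR, hk]]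
        have hc : 1 ≤ c := hruns (k, c) (by simp)
        rw [ih ((s, c + 1) :: t) (by
          intro p hp
          rcases List.mem_cons.mp hp with h | h
          · subst h; simp; omega
          · exact hruns p (List.mem_cons_of_mem _ h))]
        subst hk
        simp only [List.any_cons, hasPairP, List.head?_cons, Option.map_some]
        by_cases hs : k = "cookie"
        · simp only [hs]
          simp
          left
          omega
        · have hb : (k == "cookie") = false := by simp [hs]
          simp [hb]
      · rw [show runStepR ((k, c) :: t) s = (s, 1) :: (k, c) :: t by simp [runStepR, hk]]
        rw [ih ((s, 1) :: (k, c) :: t) (by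
          intro p hp
          rcases List.mem_cons.mp hp with h | h
          · subst h; simp
          · exact hruns p h)]
        simp only [List.any_cons, hasPairP, List.head?_cons, Option.map_some]
        have hne : (some k == some "cookie" && s == "cookie") = false := by
          by_cases hs : s = "cookie"
          · subst hs
            simp [hk]
          · simp [hs]
        rw [hne]
        simp

-- ===== VERDICT (by name: the statement is the Claim_ definition above) =====
theorem coomilk_spec : Claim_equal_coomilk := by
  intro n arr _hdom hpre
  obtain ⟨hne, hdisj⟩ := hpre
  unfold Spec_coomilk coomilk coomilk_alt
  rw [PySem.List.pyGet?_neg_one]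
  by_cases hlast : arr.getLast? = some "cookie"
  · simp [hlast]
  · rw [if_neg hlast, if_neg hlast]
    -- B side: reduce to the hasPair test on arr[:n]
    have hmax : (max n 0) = ((n.toNat : Nat) : Int) := by omega
    rw [hmax, PySem.List.slice_to_natCast]
    rw [foldl_runStep_eq_reverse, List.any_reverse, List.reverse_nil]
    rw [foldB_eq (List.take n.toNat arr) [] (by intro p hp; simp at hp)]
    simp only [List.any_nil, Bool.false_or, List.head?_nil, Option.map_none]
    rw [hasPairP_eq]
    by_cases hcase : n ≤ (arr.length : Int) + 1
    · -- the loop bound stays inside (or just at) the end of arr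
      have hA := loopA_eq arr (n - 1) (by omega) (n - 1).toNat 0 (by omega) le_rfl
      rw [hA]
      simp only [Int.toNat_zero, List.drop_zero]
      have hsame : ((n - 1) + 1).toNat = n.toNat := by omega
      rw [hsame]
      cases List.take n.toNat arr <;> simp
    · -- n ≥ len(arr)+2: Pre_ supplies an adjacent pair, so both sides are "NO"
      have hpair : ("cookie", "cookie") ∈ arr.zip arr.tail := by tauto
      rw [hasPair_iff_zip] at hpair
      have htake : List.take n.toNat arr = arr := List.take_of_length_le (by omega)
      rw [htake]
      rw [loopA_NO arr (n - 1) (by omega) arr.length 0 (by omega) le_rfl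
        (by simpa using hpair)]
      rw [hpair]
      cases arr <;> simp_all
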